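-- pv_equiv track=rewrite | github.com/ikramulkayes/Python_season_3 | 3.py | func
-- ===== SOURCE A (Python) =====
-- def func(lst):
--     dic1 = {}
--     for elm in lst:
--         year = "20"+ elm[:2]
--         deptcode = elm[3:5]
--         if deptcode == "01":
--             dept = "CSE"
--         elif deptcode == "21":
--             dept = "EEE"
--         elif deptcode == "41":
--             dept = "CS"
--         else:
--             dept = "Other"
--         if year not in dic1.keys():
--             dic1[year] = {dept:[elm]}
--         else:
--             if dept not in dic1[year].keys():
--                 dic1[year][dept] =[elm]
--             else:
--                 dic1[year][dept].append(elm)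
--     return dic1
-- ===== SOURCE B (Python) =====
-- def func(lst):
--     depts = {"01": "CSE", "21": "EEE", "41": "CS"}
--
--     def key(e):
--         return ("20" + e[:2], depts.get(e[3:5], "Other"))
--
--     ks = [key(e) for e in lst]
--     return {
--         y: {
--             d: [e for e in lst if key(e) == (y, d)]
--             for d in dict.fromkeys(d2 for y2, d2 in ks if y2 == y)
--         }
--         for y in dict.fromkeys(y for y, _ in ks)
--     }
-- ===== Notes on version B (the rewrite author's own statement) =====
-- stated objective: alternative
-- what changed: Replaces the incremental nested-dict insertion loop by a declarative two-level grouping: compute each element's (year, dept) key once, take the first-occurrence-ordered distinct years and depts, and build the nested dict by comprehensions that filter the input per group.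
import Mathlib
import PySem

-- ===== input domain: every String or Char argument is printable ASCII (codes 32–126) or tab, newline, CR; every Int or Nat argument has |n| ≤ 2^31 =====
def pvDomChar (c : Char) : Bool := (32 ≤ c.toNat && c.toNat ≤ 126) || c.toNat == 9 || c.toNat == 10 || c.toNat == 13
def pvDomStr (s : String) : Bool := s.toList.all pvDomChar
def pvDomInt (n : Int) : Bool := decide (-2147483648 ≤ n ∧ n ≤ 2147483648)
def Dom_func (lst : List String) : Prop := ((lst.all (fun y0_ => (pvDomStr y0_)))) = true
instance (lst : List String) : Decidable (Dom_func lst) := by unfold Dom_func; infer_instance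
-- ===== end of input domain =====

-- B replaces A's incremental nested-dict insertion loop by a declarative two-level grouping
-- (distinct keys in first-occurrence order + per-group filters); objective: alternative, not faster.

-- ===== PORT A =====
def func (lst : List String) : List (String × List (String × List String)) :=
  let dic1 : PySem.Dict String (PySem.Dict String (List String)) :=
    lst.foldl (fun dic1 elm =>
      let year := "20" ++ PySem.Str.slice elm none (some 2)
      let deptcode := PySem.Str.slice elm (some 3) (some 5)
      let dept := if deptcode == "01" then "CSE"
        else if deptcode == "21" then "EEE"
        else if deptcode == "41" then "CS"
        else "Other"
      if year ∉ dic1.keys then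
        dic1.insert year (PySem.Dict.empty.insert dept [elm])
      else
        let inner := dic1.getD year PySem.Dict.empty
        if dept ∉ inner.keys then
          dic1.insert year (inner.insert dept [elm])
        else
          dic1.insert year (inner.insert dept (inner.getD dept [] ++ [elm]))) PySem.Dict.empty
  dic1.items.map (fun p => (p.1, p.2.items))

-- ===== PORT B =====
def pyDeptTable : PySem.Dict String String :=
  PySem.Dict.ofList [("01", "CSE"), ("21", "EEE"), ("41", "CS")]

def pyKey (e : String) : String × String :=
  ("20" ++ PySem.Str.slice e none (some 2),
   pyDeptTable.getD (PySem.Str.slice e (some 3) (some 5)) "Other")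

def func_alt (lst : List String) : List (String × List (String × List String)) :=
  let ks := lst.map pyKey
  (PySem.List.dedup (ks.map Prod.fst)).map (fun y =>
    (y, (PySem.List.dedup ((ks.filter (fun k => k.1 == y)).map Prod.snd)).map (fun d =>
      (d, lst.filter (fun e => pyKey e == (y, d))))))

-- ===== PRECONDITION & SPEC =====
def Spec_func (lst : List String) (out : List (String × List (String × List String))) : Prop := out = func_alt lst
instance (lst : List String) (out : List (String × List (String × List String))) : Decidable (Spec_func lst out) := by unfold Spec_func; infer_instance

-- ===== CLAIM (what is proved, stated in full; the proofs are below) =====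
def Claim_equal_func : Prop := ∀ (lst : List String), Dom_func lst → Spec_func lst (func lst)

-- ===== LEMMAS AND PROOFS =====


-- proof-side names for the pieces of B's grouping
def yearsOf (lst : List String) : List String :=
  PySem.List.dedup ((lst.map pyKey).map Prod.fst)

def deptsOf (lst : List String) (y : String) : List String :=
  PySem.List.dedup (((lst.map pyKey).filter (fun k => k.1 == y)).map Prod.snd)

def membersOf (lst : List String) (y d : String) : List String :=
  lst.filter (fun e => pyKey e == (y, d))

def innerOf (lst : List String) (y : String) : PySem.Dict String (List String) :=
  PySem.Dict.mk ((deptsOf lst y).map (fun d => (d, membersOf lst y d)))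

def stateOf (lst : List String) : PySem.Dict String (PySem.Dict String (List String)) :=
  PySem.Dict.mk ((yearsOf lst).map (fun y => (y, innerOf lst y)))

-- A's loop body, named for the proofs
def stepA (dic1 : PySem.Dict String (PySem.Dict String (List String))) (elm : String) :
    PySem.Dict String (PySem.Dict String (List String)) :=
  let year := "20" ++ PySem.Str.slice elm none (some 2)
  let deptcode := PySem.Str.slice elm (some 3) (some 5)
  let dept := if deptcode == "01" then "CSE"
    else if deptcode == "21" then "EEE"
    else if deptcode == "41" then "CS"
    else "Other"
  if year ∉ dic1.keys then
    dic1.insert year (PySem.Dict.empty.insert dept [elm])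
  else
    let inner := dic1.getD year PySem.Dict.empty
    if dept ∉ inner.keys then
      dic1.insert year (inner.insert dept [elm])
    else
      dic1.insert year (inner.insert dept (inner.getD dept [] ++ [elm]))

theorem func_eq_foldl (lst : List String) :
    func lst = (lst.foldl stepA PySem.Dict.empty).items.map (fun p => (p.1, p.2.items)) := rfl

theorem deptTable_getD (dc : String) :
    pyDeptTable.getD dc "Other"
      = (if dc == "01" then "CSE" else if dc == "21" then "EEE" else if dc == "41" then "CS" else "Other") := by
  have h : pyDeptTable.items = [("01", "CSE"), ("21", "EEE"), ("41", "CS")] := by decide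
  simp only [PySem.Dict.getD, PySem.Dict.get?, h]
  by_cases h1 : dc = "01"
  · subst h1; decide
  by_cases h2 : dc = "21"
  · subst h2; decide
  by_cases h3 : dc = "41"
  · subst h3; decide
  simp [List.find?, beq_eq_false_iff_ne.mpr (Ne.symm h1), beq_eq_false_iff_ne.mpr (Ne.symm h2),
    beq_eq_false_iff_ne.mpr (Ne.symm h3), h1, h2, h3]

theorem dedup_append_singleton {α : Type} [BEq α] [LawfulBEq α] (xs : List α) (x : α) :
    PySem.List.dedup (xs ++ [x])
      = if x ∈ PySem.List.dedup xs then PySem.List.dedup xs else PySem.List.dedup xs ++ [x] := by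
  simp only [PySem.List.dedup_eq_ofList, PySem.Set.ofList_eq_foldl, List.foldl_append, List.foldl]
  simp [PySem.Set.add, PySem.Set.contains]

theorem yearsOf_append (l : List String) (e : String) :
    yearsOf (l ++ [e])
      = if (pyKey e).1 ∈ yearsOf l then yearsOf l else yearsOf l ++ [(pyKey e).1] := by
  simp only [yearsOf, List.map_append, List.map_cons, List.map_nil]
  exact dedup_append_singleton _ _

theorem deptsOf_append (l : List String) (e : String) (y : String) :
    deptsOf (l ++ [e]) y
      = if (pyKey e).1 = y then
          (if (pyKey e).2 ∈ deptsOf l y then deptsOf l y else deptsOf l y ++ [(pyKey e).2])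
        else deptsOf l y := by
  by_cases hy : (pyKey e).1 = y
  · simp only [deptsOf, List.map_append, List.map_cons, List.map_nil, List.filter_append,
      List.filter_cons, List.filter_nil, hy, if_pos, beq_self_eq_true]
    exact dedup_append_singleton _ _
  · simp only [deptsOf, List.map_append, List.map_cons, List.map_nil, List.filter_append,
      List.filter_cons, List.filter_nil, if_neg hy]
    rw [show ((pyKey e).1 == y) = false from beq_eq_false_iff_ne.mpr hy]
    simp

theorem membersOf_append (l : List String) (e : String) (y d : String) :
    membersOf (l ++ [e]) y d
      = membersOf l y d ++ (if pyKey e = (y, d) then [e] else []) := by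
  simp only [membersOf, List.filter_append, List.filter_cons, List.filter_nil]
  by_cases h : pyKey e = (y, d) <;> simp [h]

theorem mem_yearsOf (lst : List String) (y : String) :
    y ∈ yearsOf lst ↔ ∃ e ∈ lst, (pyKey e).1 = y := by
  simp [yearsOf]

theorem mem_deptsOf (lst : List String) (y d : String) :
    d ∈ deptsOf lst y ↔ ∃ e ∈ lst, pyKey e = (y, d) := by
  simp [deptsOf, List.mem_filter, Prod.ext_iff]

theorem keys_stateOf (lst : List String) : (stateOf lst).keys = yearsOf lst := by
  simp [stateOf, PySem.Dict.keys, Function.comp_def]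

theorem keys_innerOf (lst : List String) (y : String) : (innerOf lst y).keys = deptsOf lst y := by
  simp [innerOf, PySem.Dict.keys, Function.comp_def]

theorem nodup_yearsOf (lst : List String) : (yearsOf lst).Nodup := PySem.List.nodup_dedup _

theorem nodup_deptsOf (lst : List String) (y : String) : (deptsOf lst y).Nodup := PySem.List.nodup_dedup _

theorem membersOf_eq_nil_of_not_mem_depts (l : List String) (y d : String)
    (h : d ∉ deptsOf l y) : membersOf l y d = [] := by
  rw [membersOf, List.filter_eq_nil_iff]
  intro e he hk
  exact h ((mem_deptsOf l y d).mpr ⟨e, he, by simpa using hk⟩)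

theorem deptsOf_eq_nil_of_not_mem_years (l : List String) (y : String)
    (h : y ∉ yearsOf l) : deptsOf l y = [] := by
  rw [deptsOf]
  have : List.filter (fun k => k.1 == y) (List.map pyKey l) = [] := by
    rw [List.filter_eq_nil_iff]
    intro k hk hky
    rcases List.mem_map.mp hk with ⟨e, he, rfl⟩
    exact h ((mem_yearsOf l y).mpr ⟨e, he, by simpa using hky⟩)
  simp [this, PySem.List.dedup]

theorem getD_stateOf (l : List String) (y : String) (h : y ∈ yearsOf l) :
    (stateOf l).getD y PySem.Dict.empty = innerOf l y := by
  apply PySem.Dict.getD_of_mem_items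
  · exact List.mem_map.mpr ⟨y, h, rfl⟩
  · rw [keys_stateOf]; exact nodup_yearsOf l

theorem getD_innerOf (l : List String) (y d : String) (h : d ∈ deptsOf l y) :
    (innerOf l y).getD d [] = membersOf l y d := by
  apply PySem.Dict.getD_of_mem_items
  · exact List.mem_map.mpr ⟨d, h, rfl⟩
  · rw [keys_innerOf]; exact nodup_deptsOf l y

theorem innerOf_append_of_ne (l : List String) (e : String) (y : String) (h : (pyKey e).1 ≠ y) :
    innerOf (l ++ [e]) y = innerOf l y := by
  unfold innerOf
  rw [deptsOf_append, if_neg h]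
  congr 1
  apply List.map_congr_left
  intro d _
  rw [membersOf_append, if_neg (by intro hc; exact h (by rw [hc]))]
  simp

theorem empty_insert_eq_mk (k : String) (v : List String) :
    (PySem.Dict.empty.insert k v) = PySem.Dict.mk [(k, v)] := by
  apply PySem.Dict.ext
  rw [PySem.Dict.items_insert_of_not_contains _ _ (PySem.Dict.contains_empty k)]
  rfl

theorem innerOf_append_self_fresh (l : List String) (e : String)
    (hY : (pyKey e).1 ∉ yearsOf l) :
    innerOf (l ++ [e]) (pyKey e).1 = PySem.Dict.mk [((pyKey e).2, [e])] := by
  have hdep : deptsOf l (pyKey e).1 = [] := deptsOf_eq_nil_of_not_mem_years l _ hY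
  have hd0 : (pyKey e).2 ∉ deptsOf l (pyKey e).1 := by rw [hdep]; simp
  unfold innerOf
  rw [deptsOf_append, if_pos rfl, if_neg hd0, hdep]
  simp only [List.nil_append, List.map_cons, List.map_nil]
  rw [membersOf_append, if_pos rfl, membersOf_eq_nil_of_not_mem_depts l _ _ hd0]
  rfl

theorem stepA_eq (dic : PySem.Dict String (PySem.Dict String (List String))) (e : String) :
    stepA dic e =
      (if (pyKey e).1 ∉ dic.keys then
        dic.insert (pyKey e).1 (PySem.Dict.empty.insert (pyKey e).2 [e])
      else
        let inner := dic.getD (pyKey e).1 PySem.Dict.empty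
        if (pyKey e).2 ∉ inner.keys then
          dic.insert (pyKey e).1 (inner.insert (pyKey e).2 [e])
        else
          dic.insert (pyKey e).1 (inner.insert (pyKey e).2 (inner.getD (pyKey e).2 [] ++ [e]))) := by
  simp only [stepA, pyKey, deptTable_getD]

theorem innerOf_append_self_newdept (l : List String) (e : String)
    (hD : (pyKey e).2 ∉ deptsOf l (pyKey e).1) :
    innerOf (l ++ [e]) (pyKey e).1 = (innerOf l (pyKey e).1).insert (pyKey e).2 [e] := by
  apply PySem.Dict.ext
  rw [PySem.Dict.items_insert_of_not_contains _ _
    (by rw [← Bool.not_eq_true, PySem.Dict.contains_iff_mem_keys, keys_innerOf]; exact hD)]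
  show ((deptsOf (l ++ [e]) (pyKey e).1).map (fun d => (d, membersOf (l ++ [e]) (pyKey e).1 d)))
      = ((deptsOf l (pyKey e).1).map (fun d => (d, membersOf l (pyKey e).1 d))) ++ [((pyKey e).2, [e])]
  rw [deptsOf_append, if_pos rfl, if_neg hD, List.map_append]
  congr 1
  · apply List.map_congr_left
    intro d hd
    rw [membersOf_append, if_neg (by
      intro hc
      exact hD (by rw [show (pyKey e).2 = d from congrArg Prod.snd hc]; exact hd))]
    simp
  · simp only [List.map_cons, List.map_nil]
    rw [membersOf_append, if_pos rfl, membersOf_eq_nil_of_not_mem_depts l _ _ hD]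
    rfl

theorem innerOf_append_self_old (l : List String) (e : String)
    (hD : (pyKey e).2 ∈ deptsOf l (pyKey e).1) :
    innerOf (l ++ [e]) (pyKey e).1
      = (innerOf l (pyKey e).1).insert (pyKey e).2 (membersOf l (pyKey e).1 (pyKey e).2 ++ [e]) := by
  apply PySem.Dict.ext
  rw [PySem.Dict.items_insert_of_contains _ _
    (by rw [PySem.Dict.contains_iff_mem_keys, keys_innerOf]; exact hD)]
  show ((deptsOf (l ++ [e]) (pyKey e).1).map (fun d => (d, membersOf (l ++ [e]) (pyKey e).1 d)))
      = ((deptsOf l (pyKey e).1).map (fun d => (d, membersOf l (pyKey e).1 d))).map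
          (fun p => if p.1 == (pyKey e).2 then ((pyKey e).2, membersOf l (pyKey e).1 (pyKey e).2 ++ [e]) else p)
  rw [deptsOf_append, if_pos rfl, if_pos hD, List.map_map]
  apply List.map_congr_left
  intro d hd
  by_cases hdd : d = (pyKey e).2
  · subst hdd
    simp only [Function.comp_apply, beq_self_eq_true, if_pos]
    rw [membersOf_append, if_pos rfl]
  · rw [membersOf_append, if_neg (by
      intro hc; exact hdd (congrArg Prod.snd hc).symm)]
    simp only [Function.comp_apply, beq_eq_false_iff_ne.mpr hdd, List.append_nil]
    simp

theorem state_insert_eq (l : List String) (e : String)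
    (hY : (pyKey e).1 ∈ yearsOf l)
    (v : PySem.Dict String (List String)) (hv : v = innerOf (l ++ [e]) (pyKey e).1) :
    (stateOf l).insert (pyKey e).1 v = stateOf (l ++ [e]) := by
  apply PySem.Dict.ext
  rw [PySem.Dict.items_insert_of_contains _ _
    (by rw [PySem.Dict.contains_iff_mem_keys, keys_stateOf]; exact hY)]
  show ((yearsOf l).map (fun y => (y, innerOf l y))).map
      (fun p => if p.1 == (pyKey e).1 then ((pyKey e).1, v) else p)
      = (yearsOf (l ++ [e])).map (fun y => (y, innerOf (l ++ [e]) y))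
  rw [List.map_map, yearsOf_append, if_pos hY]
  apply List.map_congr_left
  intro y hy
  by_cases hyy : y = (pyKey e).1
  · subst hyy
    simp only [Function.comp_apply, beq_self_eq_true, if_pos]
    rw [hv]
  · simp only [Function.comp_apply, beq_eq_false_iff_ne.mpr hyy]
    simp [innerOf_append_of_ne l e y (fun h => hyy h.symm)]

theorem stepA_stateOf (l : List String) (e : String) :
    stepA (stateOf l) e = stateOf (l ++ [e]) := by
  rw [stepA_eq]
  by_cases hY : (pyKey e).1 ∈ yearsOf l
  · rw [if_neg (by rw [keys_stateOf]; exact not_not_intro hY)]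
    simp only [getD_stateOf l _ hY, keys_innerOf]
    by_cases hD : (pyKey e).2 ∈ deptsOf l (pyKey e).1
    · rw [if_neg (not_not_intro hD), getD_innerOf l _ _ hD]
      exact state_insert_eq l e hY _ (innerOf_append_self_old l e hD).symm
    · rw [if_pos hD]
      exact state_insert_eq l e hY _ (innerOf_append_self_newdept l e hD).symm
  · rw [if_pos (by rw [keys_stateOf]; exact hY)]
    apply PySem.Dict.ext
    rw [PySem.Dict.items_insert_of_not_contains _ _
      (by rw [← Bool.not_eq_true, PySem.Dict.contains_iff_mem_keys, keys_stateOf]; exact hY)]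
    show ((yearsOf l).map (fun y => (y, innerOf l y))) ++ [((pyKey e).1, PySem.Dict.empty.insert (pyKey e).2 [e])]
        = (yearsOf (l ++ [e])).map (fun y => (y, innerOf (l ++ [e]) y))
    rw [yearsOf_append, if_neg hY, List.map_append]
    congr 1
    · apply List.map_congr_left
      intro y hy
      have : (pyKey e).1 ≠ y := fun h => hY (h ▸ hy)
      rw [innerOf_append_of_ne l e y this]
    · simp only [List.map_cons, List.map_nil]
      rw [innerOf_append_self_fresh l e hY, empty_insert_eq_mk]

theorem foldl_stepA (lst : List String) :
    lst.foldl stepA PySem.Dict.empty = stateOf lst := by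
  induction lst using List.reverseRecOn with
  | nil => rfl
  | append_singleton l e ih =>
      rw [List.foldl_append, List.foldl_cons, List.foldl_nil, ih, stepA_stateOf]

theorem func_alt_eq (lst : List String) :
    func_alt lst = (stateOf lst).items.map (fun p => (p.1, p.2.items)) := by
  simp [func_alt, stateOf, innerOf, yearsOf, deptsOf, membersOf, List.map_map]

-- ===== VERDICT (by name: the statement is the Claim_ definition above) =====
theorem func_spec : Claim_equal_func := by
  intro lst _
  unfold Spec_func
  rw [func_eq_foldl, foldl_stepA, func_alt_eq]
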